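-- pv_equiv track=rewrite | github.com/tarunms7/review-like-him | review_bot/persona/dedup.py | _find_thread_root
-- ===== SOURCE A (Python) =====
-- def _find_thread_root(
--     comment_id: int,
--     parent_map: dict[int, int | None],
--     visited: set[int] | None = None,
-- ) -> int:
--     """Walk the reply chain to find the thread root comment.
--
--     Args:
--         comment_id: The comment whose root we want.
--         parent_map: Mapping of comment_id → in_reply_to_id.
--         visited: Set of already-visited IDs for cycle detection.
--
--     Returns:
--         The comment_id of the thread root.
--     """
--     if visited is None:
--         visited = set()
--
--     if comment_id in visited:
--         # Cycle detected — treat current as root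
--         return comment_id
--
--     visited.add(comment_id)
--
--     parent_id = parent_map.get(comment_id)
--     if parent_id is None or parent_id not in parent_map:
--         # No parent or parent was deleted — this is the root
--         return comment_id
--
--     return _find_thread_root(parent_id, parent_map, visited)
-- ===== SOURCE B (Python) =====
-- def _find_thread_root(comment_id, parent_map, visited=None):
--     """Bounded iterative walk: every continuing step consumes a distinct map key,
--     so len(parent_map) + 1 iterations always suffice (no unbounded while/recursion)."""
--     if visited is None:
--         visited = set()
--     for _ in range(len(parent_map) + 1):
--         if comment_id in visited:
--             return comment_id  # cycle detected - treat current as root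
--         visited.add(comment_id)
--         parent_id = parent_map.get(comment_id)
--         if parent_id is None or parent_id not in parent_map:
--             return comment_id  # no parent or parent deleted - root
--         comment_id = parent_id
--     return comment_id  # unreachable by the bound argument
-- ===== Notes on version B (the rewrite author's own statement) =====
-- stated objective: alternative
-- what changed: Replaced the unbounded tail recursion with a bounded for-range loop over an explicit fuel of len(parent_map)+1 iterations, justified by the invariant that every continuing step consumes a distinct map key; same visited-set mutation order.
import Mathlib
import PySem

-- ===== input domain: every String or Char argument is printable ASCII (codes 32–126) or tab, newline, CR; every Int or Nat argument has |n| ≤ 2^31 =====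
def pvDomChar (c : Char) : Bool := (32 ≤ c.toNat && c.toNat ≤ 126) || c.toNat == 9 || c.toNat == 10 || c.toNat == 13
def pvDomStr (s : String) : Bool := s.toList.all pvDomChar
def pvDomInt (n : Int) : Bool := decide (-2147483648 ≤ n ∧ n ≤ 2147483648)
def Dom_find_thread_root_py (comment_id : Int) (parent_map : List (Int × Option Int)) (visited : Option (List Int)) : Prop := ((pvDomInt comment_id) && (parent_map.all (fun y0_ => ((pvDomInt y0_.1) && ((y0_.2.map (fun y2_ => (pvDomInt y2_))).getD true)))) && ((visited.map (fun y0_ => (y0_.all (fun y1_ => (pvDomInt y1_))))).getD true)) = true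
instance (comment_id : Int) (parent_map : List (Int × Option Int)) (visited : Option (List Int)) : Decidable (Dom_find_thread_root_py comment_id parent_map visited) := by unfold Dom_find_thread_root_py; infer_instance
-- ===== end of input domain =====

-- B replaces A's unbounded tail recursion by a bounded for-loop over an explicit fuel of
-- len(parent_map)+1 iterations (every continuing step consumes a distinct map key, so the
-- fuel provably suffices); return values agree everywhere.  The equivalence proved here is
-- about the RETURN value; both Pythons mutate a caller-supplied visited set identically.

-- termination measure for A's port (B needs none: its loop is bounded by construction)
def ftrMeas (parent_map : List (Int × Option Int)) (comment_id : Int) (vis : List Int) : Nat :=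
  ((parent_map.map Prod.fst).filter (fun k => decide (k ∉ vis))).length +
    (if comment_id ∈ parent_map.map Prod.fst then 0 else 1)

theorem ftrFilterLt {xs : List Int} {p q : Int → Bool}
    (himp : ∀ x, q x = true → p x = true) {a : Int}
    (ha : a ∈ xs) (hpa : p a = true) (hqa : q a = false) :
    (xs.filter q).length < (xs.filter p).length := by
  induction xs with
  | nil => cases ha
  | cons y ys ih =>
    rcases List.mem_cons.mp ha with rfl | hmem
    · have hle : (ys.filter q).length ≤ (ys.filter p).length :=
        (List.monotone_filter_right ys (by intro x hx; exact himp x hx)).length_le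
      simp [hpa, hqa]
      omega
    · by_cases hqy : q y = true
      · have hpy := himp y hqy
        simp [hpy, hqy]
        exact ih hmem
      · have h1 := ih hmem
        by_cases hpy : p y = true <;> simp [hpy, hqy] <;> omega

theorem ftrMeasDec {parent_map : List (Int × Option Int)} {comment_id p : Int} {vis : List Int}
    (hnv : (PySem.Set.contains vis comment_id) = false)
    (hp : PySem.Dict.contains (PySem.Dict.mk parent_map) p = true) :
    ftrMeas parent_map p (PySem.Set.add vis comment_id) < ftrMeas parent_map comment_id vis := by
  have hnotmem : comment_id ∉ vis := by
    intro h
    rw [(PySem.Set.contains_iff vis comment_id).mpr h] at hnv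
    cases hnv
  have hadd : PySem.Set.add vis comment_id = vis ++ [comment_id] := by
    rw [PySem.Set.add, hnv]
    simp
  have hpmem : p ∈ parent_map.map Prod.fst := by
    have h := (PySem.Dict.contains_iff_mem_keys (PySem.Dict.mk parent_map) p).mp hp
    simpa [PySem.Dict.keys, PySem.Dict.items] using h
  have himp : ∀ x : Int, (fun k => decide (k ∉ vis ++ [comment_id])) x = true →
      (fun k => decide (k ∉ vis)) x = true := by
    intro x hx
    have hx' : x ∉ vis ++ [comment_id] := of_decide_eq_true hx
    exact decide_eq_true (fun h => hx' (List.mem_append_left _ h))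
  have hle : (((parent_map.map Prod.fst).filter (fun k => decide (k ∉ vis ++ [comment_id]))).length)
      ≤ (((parent_map.map Prod.fst).filter (fun k => decide (k ∉ vis))).length) :=
    (List.monotone_filter_right _ (by intro x hx; exact himp x hx)).length_le
  unfold ftrMeas
  rw [hadd]
  by_cases hc : comment_id ∈ parent_map.map Prod.fst
  · have hlt := ftrFilterLt himp hc (decide_eq_true hnotmem)
      (by simp)
    rw [if_pos hpmem, if_pos hc]
    omega
  · rw [if_pos hpmem, if_neg hc]
    omega

-- ===== PORT A =====
-- literal transliteration of A's self-recursion (default-None visited resolved with getD)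
def find_thread_root_py (comment_id : Int) (parent_map : List (Int × Option Int)) (visited : Option (List Int)) : Int :=
  let vis : PySem.Set Int := visited.getD PySem.Set.empty
  if h1 : PySem.Set.contains vis comment_id then
    -- cycle detected — treat current as root
    comment_id
  else
    let vis' := PySem.Set.add vis comment_id
    -- parent_id = parent_map.get(comment_id)
    match PySem.Dict.getD (PySem.Dict.mk parent_map) comment_id none with
    | none => comment_id      -- no parent — this is the root
    | some p =>
      if h3 : PySem.Dict.contains (PySem.Dict.mk parent_map) p then
        find_thread_root_py p parent_map (some vis')
      else comment_id         -- parent was deleted — this is the root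
termination_by ftrMeas parent_map comment_id (visited.getD [])
decreasing_by
  exact ftrMeasDec (vis := visited.getD []) (Bool.not_eq_true _ ▸ Bool.of_not_eq_true h1) h3

-- ===== PORT B =====
-- the for-loop body of Source B, structurally recursive on the remaining iteration count (fuel);
-- falling off the end of the loop returns the current comment_id, as in Source B
def ftr_go (parent_map : List (Int × Option Int)) : Nat → Int → PySem.Set Int → Int
  | 0, cid, _ => cid
  | fuel + 1, cid, vis =>
    if PySem.Set.contains vis cid then cid
    else
      match PySem.Dict.getD (PySem.Dict.mk parent_map) cid none with
      | none => cid
      | some p =>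
        if PySem.Dict.contains (PySem.Dict.mk parent_map) p then
          ftr_go parent_map fuel p (PySem.Set.add vis cid)
        else cid

def find_thread_root_py_alt (comment_id : Int) (parent_map : List (Int × Option Int)) (visited : Option (List Int)) : Int :=
  ftr_go parent_map (parent_map.length + 1) comment_id (visited.getD PySem.Set.empty)

-- ===== PRECONDITION & SPEC =====
def Spec_find_thread_root_py (comment_id : Int) (parent_map : List (Int × Option Int)) (visited : Option (List Int)) (out : Int) : Prop := out = find_thread_root_py_alt comment_id parent_map visited
instance (comment_id : Int) (parent_map : List (Int × Option Int)) (visited : Option (List Int)) (out : Int) : Decidable (Spec_find_thread_root_py comment_id parent_map visited out) := by unfold Spec_find_thread_root_py; infer_instance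

-- ===== CLAIM (what is proved, stated in full; the proofs are below) =====
def Claim_equal_find_thread_root_py : Prop := ∀ (comment_id : Int) (parent_map : List (Int × Option Int)) (visited : Option (List Int)), Dom_find_thread_root_py comment_id parent_map visited → Spec_find_thread_root_py comment_id parent_map visited (find_thread_root_py comment_id parent_map visited)

-- ===== LEMMAS AND PROOFS =====
-- A equals the fuelled loop for ANY fuel that dominates A's termination measure
theorem ftr_eq_fuel (pm : List (Int × Option Int)) (cid : Int) (vs : Option (List Int)) :
    ∀ fuel : Nat, ftrMeas pm cid (vs.getD []) ≤ fuel →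
      find_thread_root_py cid pm vs = ftr_go pm fuel cid (vs.getD PySem.Set.empty) := by
  induction cid, vs using find_thread_root_py.induct pm with
  | case1 cid vs _v h1 =>
      intro fuel _
      have hm : cid ∈ vs.getD ([] : List Int) := (PySem.Set.contains_iff _ _).mp h1
      rw [find_thread_root_py]
      cases fuel <;> simp [ftr_go, hm]
  | case2 cid vs _v h1 h2 =>
      intro fuel _
      have hm : cid ∉ vs.getD ([] : List Int) :=
        fun h => h1 ((PySem.Set.contains_iff _ _).mpr h)
      rw [find_thread_root_py]
      cases fuel <;> simp [ftr_go, hm, h2]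
  | case3 cid vs _v h1 _v2 p h2 h3 ih =>
      intro fuel hfuel
      have hm : cid ∉ vs.getD ([] : List Int) :=
        fun h => h1 ((PySem.Set.contains_iff _ _).mpr h)
      have hc : PySem.Set.contains (vs.getD ([] : List Int)) cid = false :=
        Bool.not_eq_true _ ▸ Bool.of_not_eq_true h1
      have hdec := ftrMeasDec (parent_map := pm) (vis := vs.getD []) hc h3
      cases fuel with
      | zero => omega
      | succ n =>
          have hle : ftrMeas pm p (PySem.Set.add (vs.getD []) cid) ≤ n := by omega
          rw [find_thread_root_py]
          simp only [ftr_go]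
          simp [hm, h2, h3]
          have h_v2 : _v2 = vs.getD ([] : List Int) ++ [cid] := by
            show PySem.Set.add (vs.getD []) cid = _
            rw [PySem.Set.add, hc]; simp
          have ih' := ih n hle
          rw [h_v2] at ih'
          simpa using ih' 
  | case4 cid vs _v h1 p h2 h3 =>
      intro fuel _
      have hm : cid ∉ vs.getD ([] : List Int) :=
        fun h => h1 ((PySem.Set.contains_iff _ _).mpr h)
      rw [find_thread_root_py]
      cases fuel <;> simp [ftr_go, hm, h2, h3]

-- the initial measure is at most len(parent_map) + 1: Source B's fuel suffices
theorem ftrMeas_le (pm : List (Int × Option Int)) (cid : Int) (vis : List Int) :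
    ftrMeas pm cid vis ≤ pm.length + 1 := by
  unfold ftrMeas
  have h1 : ((pm.map Prod.fst).filter (fun k => decide (k ∉ vis))).length ≤ pm.length := by
    calc ((pm.map Prod.fst).filter (fun k => decide (k ∉ vis))).length
        ≤ (pm.map Prod.fst).length := List.length_filter_le _ _
      _ = pm.length := List.length_map ..
  split <;> omega

-- ===== VERDICT (by name: the statement is the Claim_ definition above) =====
theorem find_thread_root_py_spec : Claim_equal_find_thread_root_py := by
  intro cid pm vis _
  unfold Spec_find_thread_root_py find_thread_root_py_alt
  exact ftr_eq_fuel pm cid vis (pm.length + 1) (ftrMeas_le pm cid (vis.getD []))
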